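-- pv_equiv track=rewrite | github.com/digital-land/brownfield-sites-status | application/filters.py | count_row_errors
-- ===== SOURCE A (Python) =====
-- def count_row_errors(row):
-- 	count = 0
-- 	if len(row['validator']['rowErrors']) > 0:
-- 		for error in row['validator']['rowErrors']:
-- 			if 'params' not in error.keys() or 'format' not in error['params'].keys():
-- 				count += 1
-- 			else:
-- 				if not (error['params']['format'] and error['params']['format'] == 'date'):
-- 					count += 1
--
-- 	return count
-- ===== SOURCE B (Python) =====
-- def count_row_errors(row):
--     def go(errs):
--         if not errs:
--             return 0
--         head, *rest = errs
--         fmt = head.get('params', {}).get('format')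
--         return (0 if fmt == 'date' else 1) + go(rest)
--     return go(row['validator']['rowErrors'])
-- ===== Notes on version B (the rewrite author's own statement) =====
-- stated objective: alternative
-- what changed: B replaces A's imperative loop-with-accumulator and membership-test/if-else chain by a recursive function on the error list that judges each head via chained dict.get and builds the count back-to-front, dropping the redundant len>0 guard.
import Mathlib
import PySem

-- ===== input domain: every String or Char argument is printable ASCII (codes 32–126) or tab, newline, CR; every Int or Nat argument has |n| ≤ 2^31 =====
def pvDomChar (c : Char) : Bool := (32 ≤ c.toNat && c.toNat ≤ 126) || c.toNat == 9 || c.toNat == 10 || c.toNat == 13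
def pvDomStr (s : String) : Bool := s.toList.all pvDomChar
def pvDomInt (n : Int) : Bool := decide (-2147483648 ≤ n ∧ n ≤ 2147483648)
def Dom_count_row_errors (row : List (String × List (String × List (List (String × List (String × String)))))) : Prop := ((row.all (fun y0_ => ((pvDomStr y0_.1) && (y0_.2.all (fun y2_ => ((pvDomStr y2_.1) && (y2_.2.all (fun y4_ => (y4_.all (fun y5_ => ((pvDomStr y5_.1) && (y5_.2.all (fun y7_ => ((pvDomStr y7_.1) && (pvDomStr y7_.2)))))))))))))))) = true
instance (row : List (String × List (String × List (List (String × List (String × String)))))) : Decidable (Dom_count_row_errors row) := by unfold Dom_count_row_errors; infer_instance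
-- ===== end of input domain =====

-- ===== PORT A =====
-- B recurses on the error list (no loop/accumulator), judging each error via chained dict lookups; proved equal to A.
-- dict lookup (first match) on an association list
def pvGetK {v : Type} (d : List (String × v)) (k : String) : Option v :=
  PySem.Dict.get? (PySem.Dict.mk d) k

def count_row_errors (row : List (String × List (String × List (List (String × List (String × String)))))) : Int :=
  let count : Int := 0
  match pvGetK row "validator" with
  | none => count  -- KeyError in Python: excluded by Pre_
  | some validator =>
    match pvGetK validator "rowErrors" with
    | none => count  -- KeyError in Python: excluded by Pre_
    | some rowErrors =>
      if rowErrors.length > 0 then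
        rowErrors.foldl (fun count error =>
          match pvGetK error "params" with
          | none => count + 1
          | some params =>
            match pvGetK params "format" with
            | none => count + 1
            | some f =>
              if !(decide (f ≠ "") && decide (f = "date")) then count + 1 else count) count
      else count

-- ===== PORT B =====
-- go(errs): recursion on the list; head's format via chained get, then recurse on the tail
def pvGoB : List (List (String × List (String × String))) → Int
  | [] => 0
  | head :: rest =>
    let fmt := pvGetK ((pvGetK head "params").getD []) "format"  -- head.get('params', {}).get('format')
    (if fmt == some "date" then 0 else 1) + pvGoB rest

def count_row_errors_alt (row : List (String × List (String × List (List (String × List (String × String)))))) : Int :=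
  match pvGetK row "validator" with
  | none => 0  -- KeyError in Python: excluded by Pre_
  | some validator =>
    match pvGetK validator "rowErrors" with
    | none => 0  -- KeyError in Python: excluded by Pre_
    | some errors => pvGoB errors

-- ===== PRECONDITION & SPEC =====
-- Pre_ excludes exactly the inputs where Python A raises KeyError ('validator' or 'rowErrors' key missing).
def Pre_count_row_errors (row : List (String × List (String × List (List (String × List (String × String)))))) : Prop :=
  ((pvGetK row "validator").bind (fun v => pvGetK v "rowErrors")).isSome = true
instance (row : List (String × List (String × List (List (String × List (String × String)))))) : Decidable (Pre_count_row_errors row) := by unfold Pre_count_row_errors; infer_instance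

def pvWitness_count_row_errors : (List (String × List (String × List (List (String × List (String × String)))))) :=
  [("validator", [("rowErrors", [[("params", [("format", "date")])], []])])]

def Spec_count_row_errors (row : List (String × List (String × List (List (String × List (String × String)))))) (out : Int) : Prop := out = count_row_errors_alt row
instance (row : List (String × List (String × List (List (String × List (String × String)))))) (out : Int) : Decidable (Spec_count_row_errors row out) := by unfold Spec_count_row_errors; infer_instance

-- ===== CLAIM (what is proved, stated in full; the proofs are below) =====
def Claim_equal_count_row_errors : Prop := ∀ (row : List (String × List (String × List (List (String × List (String × String)))))), Dom_count_row_errors row → Pre_count_row_errors row → Spec_count_row_errors row (count_row_errors row)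

-- ===== LEMMAS AND PROOFS =====
lemma foldl_eq_go (errors : List (List (String × List (String × String)))) (c : Int) :
    errors.foldl (fun count error =>
          match pvGetK error "params" with
          | none => count + 1
          | some params =>
            match pvGetK params "format" with
            | none => count + 1
            | some f =>
              if !(decide (f ≠ "") && decide (f = "date")) then count + 1 else count) c
      = c + pvGoB errors := by
  induction errors generalizing c with
  | nil => simp [pvGoB]
  | cons e rest ih =>
    simp only [List.foldl_cons, pvGoB]
    rw [ih]
    have h0 : pvGetK ([] : List (String × String)) "format" = none := by decide
    cases hp : pvGetK e "params" with
    | none => simp [hp, h0]; ring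
    | some p =>
      cases hf : pvGetK p "format" with
      | none => simp [hf]; ring
      | some f =>
        by_cases hd : f = "date"
        · subst hd; simp [hp, hf]
        · simp [hf, hd]; ring

-- ===== VERDICT (by name: the statement is the Claim_ definition above) =====
theorem count_row_errors_spec : Claim_equal_count_row_errors := by
  intro row _ hpre
  unfold Spec_count_row_errors count_row_errors count_row_errors_alt
  unfold Pre_count_row_errors at hpre
  cases hv : pvGetK row "validator" with
  | none => simp [hv] at hpre
  | some validator =>
    cases he : pvGetK validator "rowErrors" with
    | none => simp [hv, he] at hpre
    | some errors =>
      simp only [he]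
      by_cases hlen : errors.length > 0
      · simp only [hlen, if_true]
        rw [foldl_eq_go]
        ring
      · have : errors = [] := by
          cases errors with
          | nil => rfl
          | cons a l => simp at hlen
        subst this
        simp [pvGoB]
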